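-- pv_equiv track=rewrite | github.com/junrxia/TugasMatkulDasprog | DASPRO 5/PK.py | find_max_min_subarray
-- ===== SOURCE A (Python) =====
-- def find_max_min_subarray(arr, k, is_max):
--   n = len(arr)
--   if k > n:
--     return None  # Subarray panjang k tidak bisa dibuat
--
--   # Inisialisasi jendela pertama
--   window_sum = sum(arr[:k])
--   result = window_sum if is_max else window_sum
--
--   # Geser jendela
--   for i in range(1, n - k + 1):
--     window_sum = window_sum - arr[i - 1] + arr[i + k - 1]
--     result = max(result, window_sum) if is_max else min(result, window_sum)
--
--   return result
-- ===== SOURCE B (Python) =====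
-- def find_max_min_subarray(arr, k, is_max):
--     n = len(arr)
--     if k > n:
--         return None
--     P = [0]
--     for x in arr:
--         P.append(P[-1] + x)
--     sums = [P[i + k] - P[i] for i in range(n - k + 1)]
--     return max(sums) if is_max else min(sums)
-- ===== Notes on version B (the rewrite author's own statement) =====
-- stated objective: alternative
-- what changed: Replaces the incremental add/subtract sliding-window update by a prefix-sum table P followed by a pass over fixed-length differences P[i+k]-P[i], reduced with max/min over the whole list.
import Mathlib
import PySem

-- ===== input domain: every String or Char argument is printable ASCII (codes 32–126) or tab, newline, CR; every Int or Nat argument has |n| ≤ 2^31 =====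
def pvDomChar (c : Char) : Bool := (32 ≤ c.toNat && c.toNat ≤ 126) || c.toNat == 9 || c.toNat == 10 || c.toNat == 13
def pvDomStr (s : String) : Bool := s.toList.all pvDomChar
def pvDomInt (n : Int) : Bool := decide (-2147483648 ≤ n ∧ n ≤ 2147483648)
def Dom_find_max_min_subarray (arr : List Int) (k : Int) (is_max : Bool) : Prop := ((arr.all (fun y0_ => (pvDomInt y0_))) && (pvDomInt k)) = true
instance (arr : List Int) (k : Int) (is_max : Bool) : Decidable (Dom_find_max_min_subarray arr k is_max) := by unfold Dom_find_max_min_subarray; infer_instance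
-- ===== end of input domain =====

-- B replaces A's incremental sliding-window update with a prefix-sum table and a
-- max/min over the list of fixed-length differences (alternative decomposition, same cost).

-- ===== PORT A =====
-- literal port of A: guard k > n, initial window sum on arr[:k], then a fold
-- sliding the window by - arr[i-1] + arr[i+k-1] over range(1, n-k+1).
-- (pyGetD with default 0 is used for arr[i-1] / arr[i+k-1]; under Pre_ (0 ≤ k)
-- both indices are always in range, exactly where Python does not raise.)
def find_max_min_subarray (arr : List Int) (k : Int) (is_max : Bool) : Option Int :=
  let n : Int := PySem.List.len arr
  if k > n then none
  else
    let ws0 : Int := (PySem.List.slice arr none (some k)).sum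
    let st :=
      (PySem.List.pyRange 1 (n - k + 1) 1).foldl
        (fun (st : Int × Int) i =>
          let ws := st.1 - PySem.List.pyGetD arr (i - 1) 0 + PySem.List.pyGetD arr (i + k - 1) 0
          (ws, if is_max then max st.2 ws else min st.2 ws))
        (ws0, if is_max then ws0 else ws0)
    some st.2

-- ===== PORT B =====
-- literal port of B (Source B): build prefix sums P with P.append(P[-1] + x),
-- list the window sums P[i+k] - P[i] for i in range(n-k+1), return max/min.
def find_max_min_subarray_alt (arr : List Int) (k : Int) (is_max : Bool) : Option Int :=
  let n : Int := PySem.List.len arr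
  if k > n then none
  else
    let P := arr.foldl (fun acc x => acc ++ [PySem.List.pyGetD acc (-1) 0 + x]) [(0 : Int)]
    let sums := (PySem.List.pyRange 0 (n - k + 1) 1).map
      (fun i => PySem.List.pyGetD P (i + k) 0 - PySem.List.pyGetD P i 0)
    if is_max then PySem.List.max? sums (fun y => y) else PySem.List.min? sums (fun y => y)

-- ===== PRECONDITION & SPEC =====
-- Pre_ excludes only k < 0: there Python A always raises IndexError (the slide
-- loop indexes past the end of arr), so A returns on exactly the inputs with 0 ≤ k.
def Pre_find_max_min_subarray (arr : List Int) (k : Int) (is_max : Bool) : Prop := 0 ≤ k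
instance (arr : List Int) (k : Int) (is_max : Bool) : Decidable (Pre_find_max_min_subarray arr k is_max) := by unfold Pre_find_max_min_subarray; infer_instance

def pvWitness_find_max_min_subarray : List Int × Int × Bool := ([1, -2, 3, 4], 2, true)

def Spec_find_max_min_subarray (arr : List Int) (k : Int) (is_max : Bool) (out : Option Int) : Prop := out = find_max_min_subarray_alt arr k is_max
instance (arr : List Int) (k : Int) (is_max : Bool) (out : Option Int) : Decidable (Spec_find_max_min_subarray arr k is_max out) := by unfold Spec_find_max_min_subarray; infer_instance

-- ===== CLAIM (what is proved, stated in full; the proofs are below) =====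
def Claim_equal_find_max_min_subarray : Prop := ∀ (arr : List Int) (k : Int) (is_max : Bool), Dom_find_max_min_subarray arr k is_max → Pre_find_max_min_subarray arr k is_max → Spec_find_max_min_subarray arr k is_max (find_max_min_subarray arr k is_max)

-- ===== LEMMAS AND PROOFS =====

-- prefix sums: B's fold is List.scanl (·+·)
theorem pvFoldP (l ys : List Int) (a : Int) :
    l.foldl (fun acc x => acc ++ [PySem.List.pyGetD acc (-1) 0 + x]) (ys ++ [a])
      = ys ++ List.scanl (· + ·) a l := by
  induction l generalizing ys a with
  | nil => simp
  | cons x t ih =>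
    simp only [List.foldl_cons, PySem.List.pyGetD_neg_one_append_singleton]
    rw [ih (ys ++ [a]) (a + x), List.scanl_cons]
    simp

theorem pvScanlGetD (l : List Int) (a : Int) (i : Nat) (hi : i ≤ l.length) :
    (List.scanl (· + ·) a l).getD i 0 = a + (l.take i).sum := by
  induction l generalizing a i with
  | nil =>
    cases i with
    | zero => simp
    | succ j => simp at hi
  | cons x t ih =>
    cases i with
    | zero => simp [List.scanl_cons]
    | succ j =>
      rw [List.scanl_cons, List.getD_cons_succ, ih (a + x) j (by simpa using hi)]
      simp
      ring

theorem pvTakeSucc (l : List Int) (j : Nat) (hj : j < l.length) :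
    (l.take (j + 1)).sum = (l.take j).sum + l.getD j 0 := by
  rw [← List.take_concat_get (h := hj), List.concat_eq_append, List.sum_append]
  simp [List.getD, List.getElem?_eq_getElem hj]

-- prefix sums and window sums
def pvT (arr : List Int) (j : Nat) : Int := (arr.take j).sum
def pvW (arr : List Int) (kn j : Nat) : Int := pvT arr (j + kn) - pvT arr j

theorem pvW_zero (arr : List Int) (kn : Nat) : pvW arr kn 0 = pvT arr kn := by
  simp [pvW, pvT]

theorem pvW_succ (arr : List Int) (kn m : Nat) (h : m + kn < arr.length) :
    pvW arr kn (m + 1) = pvW arr kn m - arr.getD m 0 + arr.getD (m + kn) 0 := by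
  unfold pvW pvT
  have e : m + 1 + kn = (m + kn) + 1 := by omega
  rw [e, pvTakeSucc arr (m + kn) h, pvTakeSucc arr m (by omega)]
  ring

-- A's slide loop, characterised: state after m steps
theorem pvAfold (arr : List Int) (kn : Nat) (k : Int) (hk : k = (kn : Int))
    (op : Int → Int → Int) :
    ∀ m : Nat, m + kn ≤ arr.length →
    ((List.range m).map (fun j : Nat => (1 : Int) + (j : Int))).foldl
      (fun (st : Int × Int) i =>
        (st.1 - PySem.List.pyGetD arr (i - 1) 0 + PySem.List.pyGetD arr (i + k - 1) 0,
         op st.2 (st.1 - PySem.List.pyGetD arr (i - 1) 0 + PySem.List.pyGetD arr (i + k - 1) 0)))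
      (pvW arr kn 0, pvW arr kn 0)
    = (pvW arr kn m,
       ((List.range m).map (fun j : Nat => pvW arr kn (j + 1))).foldl op (pvW arr kn 0)) := by
  intro m
  induction m with
  | zero => intro _; simp
  | succ m ih =>
    intro hm
    rw [List.range_succ, List.map_append, List.map_append, List.foldl_append,
        List.foldl_append, ih (by omega)]
    simp only [List.map_cons, List.map_nil, List.foldl_cons, List.foldl_nil]
    have e1 : (1 : Int) + (m : Int) - 1 = ((m : Nat) : Int) := by ring
    have e2 : (1 : Int) + (m : Int) + k - 1 = (((m + kn : Nat)) : Int) := by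
      subst hk; push_cast; ring
    rw [e1, e2, PySem.List.pyGetD_natCast, PySem.List.pyGetD_natCast,
        ← pvW_succ arr kn m (by omega)]

-- B's window-sum list is [pvW 0, …, pvW m]
theorem pvSums (arr : List Int) (kn : Nat) (k : Int) (hk : k = (kn : Int))
    (hkn : kn ≤ arr.length) :
    (PySem.List.pyRange 0 ((arr.length : Int) - k + 1) 1).map
      (fun i =>
        PySem.List.pyGetD
            (arr.foldl (fun acc x => acc ++ [PySem.List.pyGetD acc (-1) 0 + x]) [(0 : Int)])
            (i + k) 0
          - PySem.List.pyGetD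
            (arr.foldl (fun acc x => acc ++ [PySem.List.pyGetD acc (-1) 0 + x]) [(0 : Int)])
            i 0)
    = (List.range (arr.length - kn + 1)).map (fun j => pvW arr kn j) := by
  have hP : arr.foldl (fun acc x => acc ++ [PySem.List.pyGetD acc (-1) 0 + x]) [(0 : Int)]
      = List.scanl (· + ·) 0 arr := by
    simpa using pvFoldP arr [] 0
  have hlen : ((arr.length : Int) - k + 1 - 0).toNat = arr.length - kn + 1 := by omega
  rw [PySem.List.pyRange_one, hlen, List.map_map]
  apply List.map_congr_left
  intro j hj
  have hj' : j ≤ arr.length - kn := by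
    have := List.mem_range.mp hj; omega
  have ej : (0 : Int) + (j : Int) + k = (((j + kn : Nat)) : Int) := by
    subst hk; push_cast; ring
  have ej0 : (0 : Int) + (j : Int) = ((j : Nat) : Int) := by ring
  simp only [Function.comp]
  rw [ej, ej0, PySem.List.pyGetD_natCast, PySem.List.pyGetD_natCast, hP,
      pvScanlGetD arr 0 (j + kn) (by omega), pvScanlGetD arr 0 j (by omega)]
  simp [pvW, pvT]

theorem find_max_min_subarray_spec : Claim_equal_find_max_min_subarray := by
  unfold Claim_equal_find_max_min_subarray
  intro arr k is_max _ hk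
  unfold Spec_find_max_min_subarray find_max_min_subarray find_max_min_subarray_alt
  simp only [PySem.List.len_eq]
  by_cases hgt : k > (arr.length : Int)
  · simp [hgt]
  · have hk0 : (0 : Int) ≤ k := hk
    have hkc : k = (k.toNat : Int) := (Int.toNat_of_nonneg hk0).symm
    set kn := k.toNat with hkn_def
    have hkn : kn ≤ arr.length := by omega
    set m := arr.length - kn with hm_def
    have hrange : ((arr.length : Int) - k + 1 - 1).toNat = m := by omega
    rw [if_neg hgt, if_neg hgt, PySem.List.slice_to arr hk0,
        pvSums arr kn k hkc hkn,
        PySem.List.pyRange_one, hrange]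
    have hws : (arr.take k.toNat).sum = pvW arr kn 0 := by
      rw [pvW_zero]; rfl
    have hMm : m + kn ≤ arr.length := by omega
    have hsplit : List.range (m + 1) = 0 :: (List.range m).map Nat.succ :=
      List.range_succ_eq_map
    rw [hws, hsplit, List.map_cons, List.map_map]
    cases is_max with
    | true =>
      simp only [if_true, ite_self]
      rw [pvAfold arr kn k hkc max m hMm]
      rw [PySem.List.max?_id_cons]
      simp [Function.comp_def]
    | false =>
      simp only [Bool.false_eq_true, if_false, ite_self]
      rw [pvAfold arr kn k hkc min m hMm]
      rw [PySem.List.min?_id_cons]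
      simp [Function.comp_def]
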